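-- pv_equiv track=rewrite | github.com/tresni/AdventOfCode | 2020/day14.py | gen_register
-- ===== SOURCE A (Python) =====
-- def gen_register(register, mask):
--     for mask, negate in flipper(mask):
--         treg = register
--         index = 0
--         while (index := mask.find("1", index)) != -1:
--             treg |= 1 << (len(mask) - index - 1)
--             index += 1
--         treg &= ~(negate)
--         yield treg
--
-- def flipper(mask, negate=0):
--     if (index := mask.find("X")) != -1:
--         tmask = mask[:index] + "1" + mask[index+1:]
--         yield from flipper(tmask, negate)
--         tmask = mask[:index] + "0" + mask[index+1:]
--         negate |= 1 << (len(mask) - index - 1)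
--         yield from flipper(tmask, negate)
--     else:
--         yield mask, negate
-- ===== SOURCE B (Python) =====
-- from itertools import product
--
--
-- def gen_register(register, mask):
--     # One left-to-right scan: fold fixed '1' bits into a base value and
--     # collect the bit weight of each 'X' position; then one flat loop over
--     # all True/False assignments (itertools.product matches the 1-before-0,
--     # leftmost-slowest order) builds each address from the base.
--     n = len(mask)
--     base = register
--     xbits = []
--     for i, c in enumerate(mask):
--         if c == "1":
--             base |= 1 << (n - i - 1)
--         elif c == "X":
--             xbits.append(1 << (n - i - 1))
--     for combo in product((True, False), repeat=len(xbits)):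
--         t = 0
--         f = 0
--         for b, keep in zip(xbits, combo):
--             if keep:
--                 t |= b
--             else:
--                 f |= b
--         yield (base | t) & ~f
-- ===== Notes on version B (the rewrite author's own statement) =====
-- stated objective: simpler
-- what changed: A recursively rewrites the mask string for every X (re-slicing strings and re-scanning each fully resolved mask for its '1' bits with find); B scans the mask once to fold the fixed '1' bits into a base value and collect the X bit weights, then one flat itertools.product loop ORs/AND-NOTs the chosen X bits onto the base.
import Mathlib
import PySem

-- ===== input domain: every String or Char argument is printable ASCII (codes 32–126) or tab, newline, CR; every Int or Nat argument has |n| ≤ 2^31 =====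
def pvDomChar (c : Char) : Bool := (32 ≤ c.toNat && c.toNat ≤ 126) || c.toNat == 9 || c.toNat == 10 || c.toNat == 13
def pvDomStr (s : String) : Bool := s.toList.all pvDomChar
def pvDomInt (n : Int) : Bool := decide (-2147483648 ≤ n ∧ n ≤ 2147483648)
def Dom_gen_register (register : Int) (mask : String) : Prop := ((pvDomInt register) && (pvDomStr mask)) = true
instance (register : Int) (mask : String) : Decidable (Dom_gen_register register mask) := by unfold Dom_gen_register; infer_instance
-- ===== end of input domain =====

-- B replaces A's recursive mask-rewriting (which rescans every resolved mask for '1's) by one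
-- scan collecting a base value and the 'X' bit weights, then a flat loop over all True/False
-- assignments; objective: simpler/alternative (A is a generator; return-value equivalence only).

-- ===== PORT A =====

-- termination fact for pvFlipper (cited by its decreasing_by): the first 'X' found is an 'X'
-- of the list, so rewriting it to '1'/'0' strictly lowers the 'X'-count.
theorem pvFindX_spec (cs : List Char) (h : PySem.Chars.find cs ['X'] ≠ -1) :
    (PySem.Chars.find cs ['X']).toNat < cs.length ∧
      cs.drop (PySem.Chars.find cs ['X']).toNat = 'X' :: cs.drop ((PySem.Chars.find cs ['X']).toNat + 1) ∧
      'X' ∉ cs.take (PySem.Chars.find cs ['X']).toNat := by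
  have h0 : (0:Int) ≤ PySem.Chars.find cs ['X'] := by
    rcases (PySem.Chars.neg_one_le_find cs ['X']).lt_or_eq with h' | h'
    · omega
    · exact absurd h'.symm h
  obtain ⟨h1, h2⟩ := PySem.Chars.find_spec h0
  obtain ⟨t, ht⟩ := h1
  have hlen : (PySem.Chars.find cs ['X']).toNat < cs.length := by
    by_contra hge
    rw [List.drop_eq_nil_of_le (by omega)] at ht
    simp at ht
  refine ⟨hlen, ?_, ?_⟩
  · have hdrop : cs.drop ((PySem.Chars.find cs ['X']).toNat + 1) = t := by
      have h3 : List.drop 1 (List.drop (PySem.Chars.find cs ['X']).toNat cs)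
          = List.drop ((PySem.Chars.find cs ['X']).toNat + 1) cs := by
        rw [List.drop_drop]
      rw [← h3, ← ht]
      rfl
    rw [hdrop, ← ht]
    rfl
  · intro hmem
    obtain ⟨j, hjlt, hj⟩ := List.getElem_of_mem hmem
    have hjlt' : j < (PySem.Chars.find cs ['X']).toNat := by
      have := hjlt
      rw [List.length_take] at this
      omega
    have hjcs : cs[j]'(by omega) = 'X' := by
      rw [← hj]
      exact (List.getElem_take).symm
    exact h2 j hjlt' ⟨cs.drop (j+1), by rw [List.singleton_append, ← hjcs, ← List.drop_eq_getElem_cons]⟩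

theorem pvFlipper_count_lt (cs : List Char) (c : Char) (hc : c ≠ 'X')
    (h : PySem.Chars.find cs ['X'] ≠ -1) :
    (cs.take (PySem.Chars.find cs ['X']).toNat ++ c :: cs.drop ((PySem.Chars.find cs ['X']).toNat + 1)).count 'X'
      < cs.count 'X' := by
  obtain ⟨hlt, hdrop, htake⟩ := pvFindX_spec cs h
  have hsplit : cs.count 'X'
      = (cs.take (PySem.Chars.find cs ['X']).toNat).count 'X'
        + (cs.drop (PySem.Chars.find cs ['X']).toNat).count 'X' := by
    rw [← List.count_append, List.take_append_drop]
  rw [hdrop] at hsplit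
  simp only [List.count_cons, List.count_append, List.count_eq_zero.2 htake] at *
  simp [hsplit, hc]

-- port of flipper (works on the string's char list; PySem.Str.* are thin wrappers over these)
def pvFlipper (cs : List Char) (negate : Int) : List (List Char × Int) :=
  let f := PySem.Chars.find cs ['X']
  if h : f ≠ -1 then
    let i := f.toNat
    let t1 := PySem.Chars.slice cs none (some f) ++ ['1'] ++ PySem.Chars.slice cs (some (f + 1)) none
    let t0 := PySem.Chars.slice cs none (some f) ++ ['0'] ++ PySem.Chars.slice cs (some (f + 1)) none
    pvFlipper t1 negate ++ pvFlipper t0 (PySem.Int.bor negate ((1 : Int) <<< (cs.length - i - 1)))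
  else [(cs, negate)]
termination_by cs.count 'X'
decreasing_by
  all_goals {
    have hs := pvFindX_spec cs h
    have h0 : (0:Int) ≤ PySem.Chars.find cs ['X'] := by
      rcases (PySem.Chars.neg_one_le_find cs ['X']).lt_or_eq with h' | h'
      · omega
      · exact absurd h'.symm h
    simp only [PySem.Chars.slice_eq_listSlice, PySem.List.slice_to cs h0,
      PySem.List.slice_from cs (by omega : (0:Int) ≤ PySem.Chars.find cs ['X'] + 1),
      List.append_assoc, List.singleton_append]
    have : (PySem.Chars.find cs ['X'] + 1).toNat = (PySem.Chars.find cs ['X']).toNat + 1 := by omega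
    rw [this]
    first
      | exact pvFlipper_count_lt cs '1' (by decide) h
      | exact pvFlipper_count_lt cs '0' (by decide) h }

-- port of the inner while loop of gen_register: index := mask.find("1", index); treg |= …; index += 1
-- (the `index ≤ cs.length` conjunct only makes the recursion total; Python's find returns -1 there too)
def pvOnesLoop (cs : List Char) (treg : Int) (index : Nat) : Int :=
  let f := PySem.Chars.findFrom cs ['1'] (index : Int)
  if h : index ≤ cs.length ∧ f ≠ -1 then
    pvOnesLoop cs (PySem.Int.bor treg ((1 : Int) <<< (cs.length - f.toNat - 1))) (f.toNat + 1)
  else treg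
termination_by cs.length - index
decreasing_by
  have hs := PySem.Chars.findFrom_natCast_spec cs ['1'] index h.1 h.2
  have h1 : ['1'] <+: cs.drop (PySem.Chars.findFrom cs ['1'] (index : Int)).toNat := hs.2.1
  have h2 : (PySem.Chars.findFrom cs ['1'] (index : Int)).toNat < cs.length := by
    by_contra hge
    rw [List.drop_eq_nil_of_le (by omega)] at h1
    simp at h1
  have h3 : (index : Int) ≤ PySem.Chars.findFrom cs ['1'] (index : Int) := hs.1
  omega


def gen_register (register : Int) (mask : String) : List Int :=
  (pvFlipper mask.toList 0).map fun p =>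
    PySem.Int.band (pvOnesLoop p.1 register 0) (Int.not p.2)

-- ===== PORT B =====

-- one scan over the mask: base = register with fixed '1' bits folded in, plus the
-- list of 'X' bit weights (loop body of B's enumerate loop)
def pvScanStep (n : Int) (acc : Int × List Int) (p : Int × Char) : Int × List Int :=
  if p.2 = '1' then (PySem.Int.bor acc.1 ((1 : Int) <<< (n - p.1 - 1).toNat), acc.2)
  else if p.2 = 'X' then (acc.1, acc.2 ++ [(1 : Int) <<< (n - p.1 - 1).toNat])
  else acc

-- itertools.product((True, False), repeat=n): leftmost component varies slowest, True first
def pvTuples : Nat → List (List Bool)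
  | 0 => [[]]
  | n + 1 => (pvTuples n).map (true :: ·) ++ (pvTuples n).map (false :: ·)

def gen_register_alt (register : Int) (mask : String) : List Int :=
  let p := (PySem.List.enumerate mask.toList).foldl
    (pvScanStep (mask.toList.length : Int)) (register, [])
  (pvTuples p.2.length).map fun combo =>
    let tf := (p.2.zip combo).foldl
      (fun tf q => if q.2 then (PySem.Int.bor tf.1 q.1, tf.2) else (tf.1, PySem.Int.bor tf.2 q.1))
      ((0 : Int), (0 : Int))
    PySem.Int.band (PySem.Int.bor p.1 tf.1) (Int.not tf.2)

-- ===== PRECONDITION & SPEC =====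
def Spec_gen_register (register : Int) (mask : String) (out : List Int) : Prop := out = gen_register_alt register mask
instance (register : Int) (mask : String) (out : List Int) : Decidable (Spec_gen_register register mask out) := by unfold Spec_gen_register; infer_instance

-- ===== CLAIM (what is proved, stated in full; the proofs are below) =====
def Claim_equal_gen_register : Prop := ∀ (register : Int) (mask : String), Dom_gen_register register mask → Spec_gen_register register mask (gen_register register mask)

-- ===== LEMMAS AND PROOFS =====

-- spec-side recursions (used only by the proofs)
def gOnes : List Char → Int → Int
  | [], r => r
  | c :: rest, r => gOnes rest (if c = '1' then PySem.Int.bor r ((1 : Int) <<< rest.length) else r)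

def xbitsOf : List Char → List Int
  | [] => []
  | c :: rest => if c = 'X' then ((1 : Int) <<< rest.length) :: xbitsOf rest else xbitsOf rest

def resolveM : List Char → List Bool → List Char
  | [], _ => []
  | c :: rest, bs =>
    if c = 'X' then
      match bs with
      | b :: bs' => (if b then '1' else '0') :: resolveM rest bs'
      | [] => c :: resolveM rest []
    else c :: resolveM rest bs

def negOf : List Char → List Bool → Int → Int
  | [], _, neg => neg
  | c :: rest, bs, neg =>
    if c = 'X' then
      match bs with
      | b :: bs' => negOf rest bs' (if b then neg else PySem.Int.bor neg ((1 : Int) <<< rest.length))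
      | [] => negOf rest [] neg
    else negOf rest bs neg

def tAcc : List Int → List Bool → Int → Int
  | _, [], t => t
  | [], _ :: _, t => t
  | x :: xs, b :: bs, t => tAcc xs bs (if b then PySem.Int.bor t x else t)

def fAcc : List Int → List Bool → Int → Int
  | _, [], f => f
  | [], _ :: _, f => f
  | x :: xs, b :: bs, f => fAcc xs bs (if b then f else PySem.Int.bor f x)

-- ## bitwise algebra
theorem nat_sub_and_eq_ldiff (c m : Nat) : c - (c &&& m) = Nat.ldiff c m := by
  induction c using Nat.binaryRec generalizing m with
  | zero =>
    simp only [Nat.zero_and, Nat.sub_zero]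
    exact (Nat.eq_of_testBit_eq fun i => by simp [Nat.testBit_ldiff]).symm
  | bit b n ih =>
    conv_lhs => rw [← m.bit_testBit_zero_shiftRight_one]
    conv_rhs => rw [← m.bit_testBit_zero_shiftRight_one]
    rw [Nat.land_bit, Nat.ldiff_bit, ← ih (m >>> 1)]
    have hle : n &&& (m >>> 1) ≤ n := Nat.and_le_left
    cases b <;> cases m.testBit 0 <;> simp [Nat.bit_val] <;> omega

theorem nat_ldiff_ldiff (c x b : Nat) : Nat.ldiff (Nat.ldiff c x) b = Nat.ldiff c (x ||| b) := by
  refine Nat.eq_of_testBit_eq fun i => ?_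
  simp only [Nat.testBit_ldiff, Nat.testBit_or]
  cases c.testBit i <;> cases x.testBit i <;> cases b.testBit i <;> rfl

theorem bor_neg_formula {a x : Int} (ha : a < 0) (hx : 0 ≤ x) :
    PySem.Int.bor a x = -(Nat.ldiff (-a - 1).toNat x.toNat) - 1 := by
  rw [PySem.Int.bor, ← nat_sub_and_eq_ldiff]
  simp [Int.not_le.2 ha, hx]

theorem bor_nonneg {x b : Int} (hx : 0 ≤ x) (hb : 0 ≤ b) : 0 ≤ PySem.Int.bor x b := by
  rw [PySem.Int.bor_of_nonneg hx hb]; positivity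

theorem bor_assoc_nonneg (a : Int) {x b : Int} (hx : 0 ≤ x) (hb : 0 ≤ b) :
    PySem.Int.bor (PySem.Int.bor a x) b = PySem.Int.bor a (PySem.Int.bor x b) := by
  rcases le_or_gt 0 a with ha | ha
  · rw [PySem.Int.bor_of_nonneg ha hx, PySem.Int.bor_of_nonneg (Int.natCast_nonneg _) hb,
      PySem.Int.bor_of_nonneg hx hb, PySem.Int.bor_of_nonneg ha (Int.natCast_nonneg _)]
    simp [Nat.or_assoc]
  · rw [bor_neg_formula ha hx]
    have h1 : (-(Nat.ldiff (-a - 1).toNat x.toNat : Int) - 1) < 0 := by omega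
    rw [bor_neg_formula h1 hb, bor_neg_formula ha (bor_nonneg hx hb),
      PySem.Int.bor_of_nonneg hx hb]
    have h2 : (-(-(Nat.ldiff (-a - 1).toNat x.toNat : Int) - 1) - 1).toNat = Nat.ldiff (-a - 1).toNat x.toNat := by omega
    rw [h2]
    simp [nat_ldiff_ldiff]

theorem bor_rightComm_nonneg (a : Int) {x b : Int} (hx : 0 ≤ x) (hb : 0 ≤ b) :
    PySem.Int.bor (PySem.Int.bor a x) b = PySem.Int.bor (PySem.Int.bor a b) x := by
  rw [bor_assoc_nonneg a hx hb, bor_assoc_nonneg a hb hx, PySem.Int.bor_comm x b]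

theorem one_shiftLeft_int (k : Nat) : (1 : Int) <<< k = ((2 ^ k : Nat) : Int) := by
  have : ((1 : Nat) : Int) <<< k = ((1 <<< k : Nat) : Int) := rfl
  simpa [Nat.one_shiftLeft] using this

theorem one_shiftLeft_nonneg (k : Nat) : (0 : Int) ≤ (1 : Int) <<< k := by
  rw [one_shiftLeft_int]; positivity

-- ## characterisation of A's inner while loop
theorem gOnes_noOne {d : List Char} (hd : '1' ∉ d) (r : Int) : gOnes d r = r := by
  induction d generalizing r with
  | nil => rfl
  | cons c rest ih =>
    simp only [List.mem_cons, not_or] at hd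
    simp [gOnes, Ne.symm hd.1, ih hd.2]

theorem gOnes_append_oneFree {u : List Char} (hu : '1' ∉ u) (w : List Char) (r : Int) :
    gOnes (u ++ w) r = gOnes w r := by
  induction u generalizing r with
  | nil => rfl
  | cons c rest ih =>
    simp only [List.mem_cons, not_or] at hu
    simp [gOnes, Ne.symm hu.1, ih hu.2]

theorem pvOnesLoop_eq_gOnes (cs : List Char) (r : Int) (k : Nat) :
    pvOnesLoop cs r k = gOnes (cs.drop k) r := by
  have H : ∀ (n k : Nat) (r : Int), cs.length - k ≤ n → pvOnesLoop cs r k = gOnes (cs.drop k) r := by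
    intro n
    induction n with
    | zero =>
      intro k r hk
      rw [pvOnesLoop]
      have hnot : ¬ (k ≤ cs.length ∧ PySem.Chars.findFrom cs ['1'] (k : Int) ≠ -1) := by
        rintro ⟨hk', hne⟩
        have hs := PySem.Chars.findFrom_natCast_spec cs ['1'] k hk' hne
        obtain ⟨t, ht⟩ := hs.2.1
        have hlt : (PySem.Chars.findFrom cs ['1'] (k : Int)).toNat < cs.length := by
          by_contra hge
          rw [List.drop_eq_nil_of_le (by omega)] at ht
          simp at ht
        omega
      rw [dif_neg hnot, List.drop_eq_nil_of_le (by omega)]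
      rfl
    | succ n ihn =>
      intro k r hk
      rw [pvOnesLoop]
      by_cases h : k ≤ cs.length ∧ PySem.Chars.findFrom cs ['1'] (k : Int) ≠ -1
      · rw [dif_pos h]
        have hs := PySem.Chars.findFrom_natCast_spec cs ['1'] k h.1 h.2
        set f := PySem.Chars.findFrom cs ['1'] (k : Int) with hfdef
        have hkf : k ≤ f.toNat := by omega
        obtain ⟨t, ht⟩ := hs.2.1
        have hflt : f.toNat < cs.length := by
          by_contra hge
          rw [List.drop_eq_nil_of_le (by omega)] at ht
          simp at ht
        rw [ihn (f.toNat + 1) _ (by omega)]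
        have hdropf : cs.drop f.toNat = '1' :: cs.drop (f.toNat + 1) := by
          have h3 : List.drop 1 (List.drop f.toNat cs) = List.drop (f.toNat + 1) cs := by
            rw [List.drop_drop]
          rw [← h3, ← ht]
          rfl
        have hsplit : cs.drop k = (cs.drop k).take (f.toNat - k) ++ cs.drop f.toNat := by
          conv_lhs => rw [← List.take_append_drop (f.toNat - k) (cs.drop k)]
          rw [List.drop_drop]
          congr 2
          omega
        have hfree : '1' ∉ (cs.drop k).take (f.toNat - k) := by
          intro hmem
          obtain ⟨j, hjlt, hj⟩ := List.getElem_of_mem hmem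
          have hjlt' : j < f.toNat - k := by
            have := hjlt
            rw [List.length_take] at this
            omega
          have hj' : cs[k + j]'(by omega) = '1' := by
            have heq : ((cs.drop k).take (f.toNat - k))[j]'hjlt = (cs.drop k)[j]'(by
                rw [List.length_drop]; omega) := List.getElem_take
            rw [heq, List.getElem_drop] at hj
            exact hj
          refine hs.2.2 (k + j) (by omega) (by omega) ⟨cs.drop (k + j + 1), ?_⟩
          rw [List.singleton_append, ← hj', ← List.drop_eq_getElem_cons]
        rw [hsplit, gOnes_append_oneFree hfree, hdropf]
        have hlen : (cs.drop (f.toNat + 1)).length = cs.length - f.toNat - 1 := by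
          rw [List.length_drop]
          omega
        simp only [gOnes, reduceIte, hlen]
      · rw [dif_neg h]
        rcases Decidable.em (k ≤ cs.length) with hkle | hkle
        · have hfneg : PySem.Chars.findFrom cs ['1'] (k : Int) = -1 := by
            by_contra hne
            exact h ⟨hkle, hne⟩
          have hninf : ¬ ['1'] <:+: cs.drop k :=
            (PySem.Chars.findFrom_natCast_eq_neg_one_iff cs ['1'] k hkle).1 hfneg
          have hnone : '1' ∉ cs.drop k := by
            intro hmem
            obtain ⟨s1, s2, hsp⟩ := List.append_of_mem hmem
            exact hninf ⟨s1, s2, by rw [hsp]; simp⟩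
          exact (gOnes_noOne hnone r).symm
        · rw [List.drop_eq_nil_of_le (by omega)]
          rfl
  exact H (cs.length - k) k r le_rfl

-- ## characterisation of A's flipper
theorem resolveM_nilBs (cs : List Char) : resolveM cs [] = cs := by
  induction cs with
  | nil => rfl
  | cons c rest ih => by_cases h : c = 'X' <;> simp [resolveM, h, ih]

theorem negOf_nilBs (cs : List Char) (neg : Int) : negOf cs [] neg = neg := by
  induction cs generalizing neg with
  | nil => rfl
  | cons c rest ih => by_cases h : c = 'X' <;> simp [negOf, h, ih]

theorem resolveM_append_xFree {u : List Char} (hu : 'X' ∉ u) (w : List Char) (bs : List Bool) :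
    resolveM (u ++ w) bs = u ++ resolveM w bs := by
  induction u generalizing bs with
  | nil => rfl
  | cons c rest ih =>
    simp only [List.mem_cons, not_or] at hu
    simp [resolveM, Ne.symm hu.1, ih hu.2]

theorem negOf_append_xFree {u : List Char} (hu : 'X' ∉ u) (w : List Char) (bs : List Bool) (neg : Int) :
    negOf (u ++ w) bs neg = negOf w bs neg := by
  induction u generalizing bs neg with
  | nil => rfl
  | cons c rest ih =>
    simp only [List.mem_cons, not_or] at hu
    simp [negOf, Ne.symm hu.1, ih hu.2]

theorem pvFlipper_eq (cs : List Char) (neg : Int) :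
    pvFlipper cs neg
      = (pvTuples (cs.count 'X')).map fun bs => (resolveM cs bs, negOf cs bs neg) := by
  have H : ∀ (n : Nat) (cs : List Char) (neg : Int), cs.count 'X' ≤ n →
      pvFlipper cs neg
        = (pvTuples (cs.count 'X')).map fun bs => (resolveM cs bs, negOf cs bs neg) := by
    intro n
    induction n with
    | zero =>
      intro cs neg hc
      rw [pvFlipper]
      have hfind : ¬ PySem.Chars.find cs ['X'] ≠ -1 := by
        intro h
        obtain ⟨hlt, hdrop, _⟩ := pvFindX_spec cs h
        have : 'X' ∈ cs := by
          have : 'X' ∈ cs.drop (PySem.Chars.find cs ['X']).toNat := by rw [hdrop]; simp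
          exact List.mem_of_mem_drop this
        rw [Nat.le_zero, List.count_eq_zero] at hc
        exact hc this
      rw [dif_neg hfind]
      have h0 : cs.count 'X' = 0 := by omega
      rw [h0]
      simp [pvTuples, resolveM_nilBs, negOf_nilBs]
    | succ n ihn =>
      intro cs neg hc
      rw [pvFlipper]
      by_cases h : PySem.Chars.find cs ['X'] ≠ -1
      · rw [dif_pos h]
        have h0 : (0:Int) ≤ PySem.Chars.find cs ['X'] := by
          rcases (PySem.Chars.neg_one_le_find cs ['X']).lt_or_eq with h' | h'
          · omega
          · exact absurd h'.symm h
        obtain ⟨hlt, hdrop, htake⟩ := pvFindX_spec cs h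
        set i := (PySem.Chars.find cs ['X']).toNat with hidef
        simp only [PySem.Chars.slice_eq_listSlice, PySem.List.slice_to cs h0,
          PySem.List.slice_from cs (by omega : (0:Int) ≤ PySem.Chars.find cs ['X'] + 1),
          List.append_assoc, List.singleton_append]
        have hi1 : (PySem.Chars.find cs ['X'] + 1).toNat = i + 1 := by omega
        rw [hi1]
        have hcs : cs = cs.take i ++ 'X' :: cs.drop (i + 1) := by
          conv_lhs => rw [← List.take_append_drop i cs, hdrop]
        have hcount : cs.count 'X' = (cs.drop (i + 1)).count 'X' + 1 := by
          conv_lhs => rw [hcs]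
          simp [List.count_append, List.count_eq_zero.2 htake]
        have hc1 : (cs.take i ++ '1' :: cs.drop (i + 1)).count 'X' = (cs.drop (i + 1)).count 'X' := by
          simp [List.count_append, List.count_eq_zero.2 htake]
        have hc0 : (cs.take i ++ '0' :: cs.drop (i + 1)).count 'X' = (cs.drop (i + 1)).count 'X' := by
          simp [List.count_append, List.count_eq_zero.2 htake]
        have hvlen : cs.length - i - 1 = (cs.drop (i + 1)).length := by
          rw [List.length_drop]
          omega
        rw [ihn _ neg (by omega : (cs.take i ++ '1' :: cs.drop (i + 1)).count 'X' ≤ n)]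
        rw [ihn _ _ (by omega : (cs.take i ++ '0' :: cs.drop (i + 1)).count 'X' ≤ n)]
        rw [hcount, hc1, hc0]
        simp only [pvTuples, List.map_append, List.map_map]
        congr 1
        · apply List.map_congr_left
          intro bs _
          simp only [Function.comp_apply]
          have hr1 : resolveM (cs.take i ++ '1' :: cs.drop (i + 1)) bs
              = cs.take i ++ '1' :: resolveM (cs.drop (i + 1)) bs := by
            rw [resolveM_append_xFree htake]
            simp [resolveM]
          have hrc : resolveM cs (true :: bs)
              = cs.take i ++ '1' :: resolveM (cs.drop (i + 1)) bs := by
            conv_lhs => rw [hcs]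
            rw [resolveM_append_xFree htake]
            simp [resolveM]
          have hn1 : negOf (cs.take i ++ '1' :: cs.drop (i + 1)) bs neg
              = negOf (cs.drop (i + 1)) bs neg := by
            rw [negOf_append_xFree htake]
            simp [negOf]
          have hnc : negOf cs (true :: bs) neg = negOf (cs.drop (i + 1)) bs neg := by
            conv_lhs => rw [hcs]
            rw [negOf_append_xFree htake]
            simp [negOf]
          rw [hr1, hrc, hn1, hnc]
        · apply List.map_congr_left
          intro bs _
          simp only [Function.comp_apply]
          have hr0 : resolveM (cs.take i ++ '0' :: cs.drop (i + 1)) bs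
              = cs.take i ++ '0' :: resolveM (cs.drop (i + 1)) bs := by
            rw [resolveM_append_xFree htake]
            simp [resolveM]
          have hrc : resolveM cs (false :: bs)
              = cs.take i ++ '0' :: resolveM (cs.drop (i + 1)) bs := by
            conv_lhs => rw [hcs]
            rw [resolveM_append_xFree htake]
            simp [resolveM]
          have hn0 : negOf (cs.take i ++ '0' :: cs.drop (i + 1)) bs
                (PySem.Int.bor neg ((1:Int) <<< (cs.length - i - 1)))
              = negOf (cs.drop (i + 1)) bs (PySem.Int.bor neg ((1:Int) <<< (cs.drop (i + 1)).length)) := by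
            rw [negOf_append_xFree htake, hvlen]
            simp [negOf]
          have hnc : negOf cs (false :: bs) neg
              = negOf (cs.drop (i + 1)) bs (PySem.Int.bor neg ((1:Int) <<< (cs.drop (i + 1)).length)) := by
            conv_lhs => rw [hcs]
            rw [negOf_append_xFree htake]
            simp [negOf]
          rw [hr0, hrc, hn0, hnc]
      · rw [dif_neg h]
        have hninf : ¬ ['X'] <:+: cs := (PySem.Chars.find_eq_neg_one_iff cs ['X']).1 (by omega)
        have hnone : 'X' ∉ cs := by
          intro hmem
          obtain ⟨s1, s2, hsp⟩ := List.append_of_mem hmem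
          exact hninf ⟨s1, s2, by rw [hsp]; simp⟩
        rw [List.count_eq_zero.2 hnone]
        simp [pvTuples, resolveM_nilBs, negOf_nilBs]
  exact H (cs.count 'X') cs neg le_rfl

-- ## characterisation of B's scan and fold
theorem pvScan_eq_gen (cs : List Char) (k : Nat) (base : Int) (xbits : List Int) :
    (PySem.List.enumerate cs (k : Int)).foldl (pvScanStep ((k + cs.length : Nat) : Int)) (base, xbits)
      = (gOnes cs base, xbits ++ xbitsOf cs) := by
  induction cs generalizing k base xbits with
  | nil => simp [PySem.List.enumerate, gOnes, xbitsOf]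
  | cons c rest ih =>
    have henum : PySem.List.enumerate (c :: rest) (k : Int)
        = ((k : Int), c) :: PySem.List.enumerate rest ((k : Int) + 1) := rfl
    have hk1 : ((k : Int) + 1) = ((k + 1 : Nat) : Int) := by omega
    have hn : ((k + (c :: rest).length : Nat) : Int) = (((k + 1) + rest.length : Nat) : Int) := by
      simp only [List.length_cons]
      omega
    have hexp : ((((k + 1) + rest.length : Nat) : Int) - (k : Int) - 1).toNat = rest.length := by
      omega
    rw [henum, List.foldl_cons, hk1, hn]
    by_cases h1 : c = '1'
    · simp only [pvScanStep, h1, reduceIte, hexp]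
      rw [ih (k + 1)]
      simp [gOnes, xbitsOf]
    · by_cases hX : c = 'X'
      · simp only [pvScanStep, h1, hX, reduceIte, hexp]
        rw [ih (k + 1)]
        simp [gOnes, xbitsOf]
      · simp only [pvScanStep, h1, hX, reduceIte]
        rw [ih (k + 1)]
        simp [gOnes, h1, hX, xbitsOf]

theorem pvScan_eq (cs : List Char) (base : Int) (xbits : List Int) :
    (PySem.List.enumerate cs).foldl (pvScanStep (cs.length : Int)) (base, xbits)
      = (gOnes cs base, xbits ++ xbitsOf cs) := by
  have h := pvScan_eq_gen cs 0 base xbits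
  simpa using h

theorem zipFold_eq (xs : List Int) (bs : List Bool) (t f : Int) :
    (xs.zip bs).foldl
        (fun tf q => if q.2 then (PySem.Int.bor tf.1 q.1, tf.2) else (tf.1, PySem.Int.bor tf.2 q.1))
        (t, f)
      = (tAcc xs bs t, fAcc xs bs f) := by
  induction xs generalizing bs t f with
  | nil => cases bs <;> simp [tAcc, fAcc]
  | cons x xs ih =>
    cases bs with
    | nil => simp [tAcc, fAcc]
    | cons b bs' => cases b <;> simp [tAcc, fAcc, ih]

-- ## per-combination equality
theorem xbitsOf_nonneg (cs : List Char) : ∀ x ∈ xbitsOf cs, (0 : Int) ≤ x := by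
  induction cs with
  | nil => simp [xbitsOf]
  | cons c rest ih =>
    by_cases h : c = 'X' <;> simp only [xbitsOf, h, if_pos, List.mem_cons] <;>
      first
        | exact ih
        | (intro x hx; rcases hx with hx | hx
           · exact hx ▸ one_shiftLeft_nonneg _
           · exact ih x hx)

theorem xbitsOf_length (cs : List Char) : (xbitsOf cs).length = cs.count 'X' := by
  induction cs with
  | nil => rfl
  | cons c rest ih => by_cases h : c = 'X' <;> simp [xbitsOf, h, ih]

theorem resolveM_length (cs : List Char) (bs : List Bool) :
    (resolveM cs bs).length = cs.length := by
  induction cs generalizing bs with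
  | nil => rfl
  | cons c rest ih =>
    by_cases h : c = 'X'
    · cases bs with
      | nil => simp [resolveM, h, ih]
      | cons b bs' => simp [resolveM, h, ih]
    · simp [resolveM, h, ih]

theorem gOnes_pull (cs : List Char) {x : Int} (hx : 0 ≤ x) (r : Int) :
    gOnes cs (PySem.Int.bor r x) = PySem.Int.bor (gOnes cs r) x := by
  induction cs generalizing r with
  | nil => rfl
  | cons c rest ih =>
    by_cases h : c = '1'
    · simp only [gOnes, h, if_pos]
      rw [bor_rightComm_nonneg r hx (one_shiftLeft_nonneg _), ih]
    · simp [gOnes, h, ih]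

theorem tAcc_pull (xs : List Int) (bs : List Bool) {x : Int} (hx : 0 ≤ x)
    (hxs : ∀ y ∈ xs, (0 : Int) ≤ y) (a : Int) :
    tAcc xs bs (PySem.Int.bor a x) = PySem.Int.bor (tAcc xs bs a) x := by
  induction xs generalizing bs a with
  | nil => cases bs <;> rfl
  | cons y ys ih =>
    cases bs with
    | nil => rfl
    | cons b bs' =>
      have hy : (0:Int) ≤ y := hxs y (by simp)
      have hys : ∀ z ∈ ys, (0:Int) ≤ z := fun z hz => hxs z (by simp [hz])
      cases b with
      | false => simpa [tAcc] using ih bs' hys a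
      | true =>
        simp only [tAcc, if_pos]
        rw [bor_rightComm_nonneg a hx hy, ih bs' hys]

theorem tAcc_nonneg (xs : List Int) (bs : List Bool) {t : Int} (ht : 0 ≤ t)
    (hxs : ∀ y ∈ xs, (0 : Int) ≤ y) : 0 ≤ tAcc xs bs t := by
  induction xs generalizing bs t with
  | nil => cases bs <;> simpa [tAcc]
  | cons x xs ih =>
    cases bs with
    | nil => simpa [tAcc]
    | cons b bs' =>
      have hx : (0:Int) ≤ x := hxs x (by simp)
      have hxs' : ∀ y ∈ xs, (0:Int) ≤ y := fun y hy => hxs y (by simp [hy])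
      cases b with
      | false => simpa [tAcc] using ih bs' ht hxs'
      | true => simpa [tAcc] using ih bs' (bor_nonneg ht hx) hxs'

theorem gOnes_resolve (cs : List Char) (bs : List Bool) (r : Int) :
    gOnes (resolveM cs bs) r = PySem.Int.bor (gOnes cs r) (tAcc (xbitsOf cs) bs 0) := by
  induction cs generalizing bs r with
  | nil =>
    cases bs <;> simp [resolveM, gOnes, xbitsOf, tAcc, PySem.Int.bor_zero]
  | cons c rest ih =>
    by_cases hX : c = 'X'
    · cases bs with
      | nil =>
        simp [resolveM, hX, gOnes, xbitsOf, tAcc, resolveM_nilBs, PySem.Int.bor_zero]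
      | cons b bs' =>
        have hbit : (0:Int) ≤ (1:Int) <<< rest.length := one_shiftLeft_nonneg _
        have hT : (0:Int) ≤ tAcc (xbitsOf rest) bs' 0 :=
          tAcc_nonneg _ _ le_rfl (xbitsOf_nonneg rest)
        cases b with
        | false => simp [resolveM, hX, gOnes, xbitsOf, tAcc, ih]
        | true =>
          subst hX
          simp only [resolveM, gOnes, xbitsOf, tAcc, resolveM_length, reduceIte]
          rw [ih bs' (PySem.Int.bor r ((1:Int) <<< rest.length)), gOnes_pull rest hbit,
            tAcc_pull _ _ hbit (xbitsOf_nonneg rest),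
            bor_assoc_nonneg _ hbit hT, PySem.Int.bor_comm ((1:Int) <<< rest.length)]
          simp
    · by_cases h1 : c = '1'
      · simp [resolveM, h1, gOnes, xbitsOf, ih, resolveM_length]
      · simp [resolveM, hX, h1, gOnes, xbitsOf, ih]

theorem negOf_eq_fAcc (cs : List Char) (bs : List Bool) (neg : Int) :
    negOf cs bs neg = fAcc (xbitsOf cs) bs neg := by
  induction cs generalizing bs neg with
  | nil => cases bs <;> rfl
  | cons c rest ih =>
    by_cases hX : c = 'X'
    · cases bs with
      | nil => simp [negOf, hX, xbitsOf, negOf_nilBs, fAcc]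
      | cons b bs' => cases b <;> simp [negOf, hX, xbitsOf, fAcc, ih]
    · simp [negOf, hX, xbitsOf, ih]

-- ===== VERDICT (by name: the statement is the Claim_ definition above) =====
theorem gen_register_spec : Claim_equal_gen_register := by
  intro register mask _
  unfold Spec_gen_register
  unfold gen_register gen_register_alt
  rw [pvFlipper_eq, List.map_map]
  simp only [pvScan_eq, List.nil_append, xbitsOf_length]
  apply List.map_congr_left
  intro bs _
  simp only [Function.comp]
  rw [zipFold_eq, pvOnesLoop_eq_gOnes, List.drop_zero, gOnes_resolve, negOf_eq_fAcc]
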